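-- pv_equiv track=rewrite | github.com/QuantuMechanix8/synced-code | general/sudoku_solver.py | get_subsquares
-- ===== SOURCE A (Python) =====
-- import math
--
-- def get_subsquares(sudoku_grid):
--     grid_size = len(sudoku_grid[0])
--
--     # side length of each subsquare but also the number of subsquares in each row/column
--     subsquares_in_row = int(math.sqrt(grid_size))
--
--     return [
--         get_subsquare(sudoku_grid, i * subsquares_in_row, j * subsquares_in_row)
--         for i in range(subsquares_in_row)
--         for j in range(subsquares_in_row)
--     ]
--
-- def get_subsquare(sudoku_grid, initial_row, initial_column):
--     subsquare_side_length = int(math.sqrt(len(sudoku_grid[0])))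
--     subsquare = []
--
--     for i in range(subsquare_side_length):
--         for j in range(subsquare_side_length):
--             row = initial_row + i
--             column = initial_column + j
--             subsquare.append(sudoku_grid[row][column])
--
--     return subsquare
-- ===== SOURCE B (Python) =====
-- import math
--
-- def get_subsquares(sudoku_grid):
--     s = int(math.sqrt(len(sudoku_grid[0])))
--     result = [[] for _ in range(s * s)]
--     for r in range(s * s):
--         row = sudoku_grid[r]
--         for c in range(s * s):
--             result[(r // s) * s + c // s].append(row[c])
--     return result
-- ===== Notes on version B (the rewrite author's own statement) =====
-- stated objective: alternative
-- what changed: B replaces the block-by-block gather through the get_subsquare helper with a single inlined cell-major sweep that scatters each cell into its block bucket result[(r//s)*s + c//s]; same O(s^4) cell count, no helper, one row lookup per row instead of per cell.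
import Mathlib
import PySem

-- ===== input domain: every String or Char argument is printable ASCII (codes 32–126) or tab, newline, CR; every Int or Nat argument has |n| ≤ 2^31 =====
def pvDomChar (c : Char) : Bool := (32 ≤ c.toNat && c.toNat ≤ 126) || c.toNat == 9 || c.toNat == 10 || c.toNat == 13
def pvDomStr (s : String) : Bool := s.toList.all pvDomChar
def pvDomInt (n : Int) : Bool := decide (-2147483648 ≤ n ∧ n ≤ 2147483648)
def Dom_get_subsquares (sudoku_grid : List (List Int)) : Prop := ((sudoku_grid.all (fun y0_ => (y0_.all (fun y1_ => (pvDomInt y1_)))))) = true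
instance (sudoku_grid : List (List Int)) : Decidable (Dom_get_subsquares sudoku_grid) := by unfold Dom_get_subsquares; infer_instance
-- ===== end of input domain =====

-- B scatters every cell into its block bucket in one cell-major sweep instead of
-- gathering block-by-block through a helper (alternative decomposition, same cost).


-- int(math.sqrt(n)) as integer floor-sqrt: exact for these row lengths, and
-- computed by a scan so the kernel can evaluate it (shared by both ports and Pre_).
def pvSqrt (n : Nat) : Nat :=
  (List.range (n + 1)).foldl (fun acc k => if k * k ≤ n then k else acc) 0

-- ===== PORT A =====
-- Python nonnegative list indexing xs[i] is ported as List.getD with a default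
-- (Python raises IndexError exactly where the default would fire; those inputs
-- are excluded by Pre_).
def get_subsquare (sudoku_grid : List (List Int)) (initial_row initial_column : Nat) : List Int :=
  let subsquare_side_length := pvSqrt ((sudoku_grid.getD 0 []).length)
  (List.range subsquare_side_length).foldl (fun subsquare i =>
    (List.range subsquare_side_length).foldl (fun subsquare j =>
      let row := initial_row + i
      let column := initial_column + j
      subsquare ++ [(sudoku_grid.getD row []).getD column 0]) subsquare) []

def get_subsquares (sudoku_grid : List (List Int)) : List (List Int) :=
  let grid_size := (sudoku_grid.getD 0 []).length
  let subsquares_in_row := pvSqrt grid_size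
  (List.range subsquares_in_row).flatMap (fun i =>
    (List.range subsquares_in_row).map (fun j =>
      get_subsquare sudoku_grid (i * subsquares_in_row) (j * subsquares_in_row)))

-- ===== PORT B =====
def get_subsquares_alt (sudoku_grid : List (List Int)) : List (List Int) :=
  let s := pvSqrt ((sudoku_grid.getD 0 []).length)
  (List.range (s * s)).foldl (fun result r =>
    let row := sudoku_grid.getD r []
    (List.range (s * s)).foldl (fun result c =>
      result.modify (r / s * s + c / s) (· ++ [row.getD c 0])) result)
    ((List.range (s * s)).map (fun _ => ([] : List Int)))

-- ===== PRECONDITION & SPEC =====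
-- Pre_ excludes exactly the inputs where Python A raises IndexError: the empty grid
-- (sudoku_grid[0]), and grids with fewer than s*s rows or a touched row shorter than s*s.
def Pre_get_subsquares (sudoku_grid : List (List Int)) : Prop :=
  sudoku_grid ≠ [] ∧
  pvSqrt ((sudoku_grid.getD 0 []).length) * pvSqrt ((sudoku_grid.getD 0 []).length) ≤ sudoku_grid.length ∧
  ∀ row ∈ sudoku_grid.take (pvSqrt ((sudoku_grid.getD 0 []).length) * pvSqrt ((sudoku_grid.getD 0 []).length)),
    pvSqrt ((sudoku_grid.getD 0 []).length) * pvSqrt ((sudoku_grid.getD 0 []).length) ≤ row.length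
instance (sudoku_grid : List (List Int)) : Decidable (Pre_get_subsquares sudoku_grid) := by
  unfold Pre_get_subsquares; infer_instance

def pvWitness_get_subsquares : List (List Int) :=
  [[1, 2, 3, 4], [5, 6, 7, 8], [9, 10, 11, 12], [13, 14, 15, 16]]

def Spec_get_subsquares (sudoku_grid : List (List Int)) (out : List (List Int)) : Prop := out = get_subsquares_alt sudoku_grid
instance (sudoku_grid : List (List Int)) (out : List (List Int)) : Decidable (Spec_get_subsquares sudoku_grid out) := by unfold Spec_get_subsquares; infer_instance

-- ===== CLAIM (what is proved, stated in full; the proofs are below) =====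
def Claim_equal_get_subsquares : Prop := ∀ (sudoku_grid : List (List Int)), Dom_get_subsquares sudoku_grid → Pre_get_subsquares sudoku_grid → Spec_get_subsquares sudoku_grid (get_subsquares sudoku_grid)

-- ===== LEMMAS AND PROOFS =====

-- the (total) cell accessor both ports use
def pvCell (g : List (List Int)) (r c : Nat) : Int := (g.getD r []).getD c 0

-- one block of A, in closed form
def pvBlock (g : List (List Int)) (s i j : Nat) : List Int :=
  (List.range s).flatMap (fun i' => (List.range s).map (fun j' => pvCell g (i * s + i') (j * s + j')))

-- one bucket of B, in closed form
def pvBucket (g : List (List Int)) (s k : Nat) : List Int :=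
  (List.range (s * s)).flatMap (fun r =>
    (List.range (s * s)).filterMap (fun c =>
      if r / s * s + c / s = k then some (pvCell g r c) else none))

lemma range_mul_flatMap (m n : Nat) :
    List.range (m * n) = (List.range m).flatMap (fun q => (List.range n).map (fun r => q * n + r)) := by
  induction m with
  | zero => simp
  | succ m ih =>
      rw [Nat.succ_mul, List.range_add, List.range_succ, List.flatMap_append, ← ih]
      simp [List.flatMap]

lemma flatMap_if_eq_pick {β : Type} (n j : Nat) (L : Nat → List β) (hj : j < n) :
    (List.range n).flatMap (fun b => if b = j then L b else []) = L j := by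
  induction n with
  | zero => omega
  | succ n ih =>
      rw [List.range_succ, List.flatMap_append]
      by_cases h : j = n
      · subst h
        have hz : (List.range j).flatMap (fun b => if b = j then L b else []) = [] := by
          rw [List.flatMap_eq_nil_iff]
          intro b hb
          simp only [List.mem_range] at hb
          simp [Nat.ne_of_lt hb]
        simp [hz]
      · have hj' : j < n := by omega
        rw [ih hj']
        simp only [List.flatMap_cons, List.flatMap_nil, List.append_nil]
        rw [if_neg (Ne.symm h)]
        simp

lemma div_add_eq (s a i' : Nat) (hi : i' < s) : (a * s + i') / s = a := by
  have hs : 0 < s := by omega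
  rw [Nat.mul_comm a s, Nat.mul_add_div hs, Nat.div_eq_of_lt hi]
  omega

lemma block_coords (s a b i j : Nat) (hb : b < s) (hj : j < s) (h : a * s + b = i * s + j) :
    a = i ∧ b = j := by
  have hs : 0 < s := by omega
  have h1 : (a * s + b) % s = (i * s + j) % s := by rw [h]
  rw [Nat.mul_comm a s, Nat.mul_add_mod, Nat.mul_comm i s, Nat.mul_add_mod,
      Nat.mod_eq_of_lt hb, Nat.mod_eq_of_lt hj] at h1
  subst h1
  have h2 : a * s = i * s := by omega
  exact ⟨Nat.eq_of_mul_eq_mul_right hs h2, rfl⟩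

lemma bucket_index_lt (s r c : Nat) (hr : r < s * s) (hc : c < s * s) :
    r / s * s + c / s < s * s := by
  have hs : 0 < s := by
    by_contra h
    simp [Nat.le_zero.1 (Nat.not_lt.1 h)] at hr
  have h1 : r / s < s := (Nat.div_lt_iff_lt_mul hs).2 (by omega)
  have h2 : c / s < s := (Nat.div_lt_iff_lt_mul hs).2 (by omega)
  nlinarith

-- the scatter fold computes, per bucket, the filterMap of all scattered pairs
lemma foldl_modify_append {α : Type} (idx : α → Nat) (v : α → Int) :
    ∀ (ps : List α) (acc : List (List Int)), (∀ p ∈ ps, idx p < acc.length) →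
    ps.foldl (fun res p => res.modify (idx p) (· ++ [v p])) acc
      = acc.mapIdx (fun k l => l ++ ps.filterMap (fun p => if idx p = k then some (v p) else none)) := by
  intro ps
  induction ps with
  | nil =>
      intro acc _
      apply List.ext_getElem <;> simp
  | cons p ps ih =>
      intro acc hlt
      simp only [List.foldl_cons]
      rw [ih _ (by intro q hq; rw [List.length_modify]; exact hlt q (List.mem_cons_of_mem p hq))]
      apply List.ext_getElem
      · simp
      · intro k h1 h2
        simp only [List.getElem_mapIdx, List.getElem_modify, List.filterMap_cons]
        by_cases h : idx p = k
        · simp [h]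
        · simp [h]

lemma mapIdx_map_range_const (n : Nat) (f : Nat → List Int → List Int) (a : List Int) :
    List.mapIdx f ((List.range n).map (fun _ => a)) = (List.range n).map (fun k => f k a) := by
  apply List.ext_getElem <;> simp

-- A's helper in closed form
lemma get_subsquare_eq (g : List (List Int)) (ir ic : Nat) :
    get_subsquare g ir ic =
      (List.range (pvSqrt ((g.getD 0 []).length))).flatMap (fun i =>
        (List.range (pvSqrt ((g.getD 0 []).length))).map (fun j => pvCell g (ir + i) (ic + j))) := by
  unfold get_subsquare
  generalize pvSqrt ((g.getD 0 []).length) = s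
  have outer : ∀ (l : List Nat) (acc : List Int),
      l.foldl (fun sub i => (List.range s).foldl
          (fun sub j => sub ++ [(g.getD (ir + i) []).getD (ic + j) 0]) sub) acc
        = acc ++ l.flatMap (fun i => (List.range s).map (fun j => pvCell g (ir + i) (ic + j))) := by
    intro l
    induction l with
    | nil => simp
    | cons x xs ihl =>
        intro acc
        simp only [List.foldl_cons, List.flatMap_cons]
        rw [PySem.List.foldl_append_singleton_eq_map, ihl, List.append_assoc]
        rfl
  simpa using outer (List.range s) []

-- each bucket of B is the corresponding block of A
lemma bucket_eq_block (g : List (List Int)) (s i j : Nat) (hi : i < s) (hj : j < s) :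
    pvBucket g s (i * s + j) = pvBlock g s i j := by
  unfold pvBucket pvBlock
  rw [range_mul_flatMap s s, List.flatMap_assoc]
  simp only [List.flatMap_map, List.filterMap_flatMap, List.filterMap_map, Function.comp_def]
  rw [← flatMap_if_eq_pick s i (fun a => (List.range s).flatMap (fun i' =>
        (List.range s).map (fun j' => pvCell g (a * s + i') (j * s + j')))) hi]
  apply List.flatMap_congr
  intro a ha
  simp only [List.mem_range] at ha
  have inner : ∀ i' ∈ List.range s,
      (List.range s).flatMap (fun b => (List.range s).filterMap (fun j' =>
          if (a * s + i') / s * s + (b * s + j') / s = i * s + j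
          then some (pvCell g (a * s + i') (b * s + j')) else none))
        = if a = i then (List.range s).map (fun j' => pvCell g (a * s + i') (j * s + j')) else [] := by
    intro i' hi'
    simp only [List.mem_range] at hi'
    by_cases hai : a = i
    · simp only [hai, if_true]
      rw [← flatMap_if_eq_pick s j (fun b => (List.range s).map (fun j' =>
            pvCell g (i * s + i') (b * s + j'))) hj]
      apply List.flatMap_congr
      intro b hb
      simp only [List.mem_range] at hb
      have hcond : ∀ j' ∈ List.range s,
          (if (i * s + i') / s * s + (b * s + j') / s = i * s + j
           then some (pvCell g (i * s + i') (b * s + j')) else none)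
            = if b = j then some (pvCell g (i * s + i') (b * s + j')) else none := by
        intro j' hj'
        simp only [List.mem_range] at hj'
        rw [div_add_eq s i i' hi', div_add_eq s b j' hj']
        by_cases hbj : b = j
        · simp [hbj]
        · simp [hbj]
      rw [List.filterMap_congr hcond]
      by_cases hbj : b = j
      · simp [hbj]
      · simp [hbj]
    · simp only [hai, if_false]
      rw [List.flatMap_eq_nil_iff]
      intro b hb
      simp only [List.mem_range] at hb
      rw [List.filterMap_eq_nil_iff]
      intro j' hj'
      simp only [List.mem_range] at hj'
      rw [div_add_eq s a i' hi', div_add_eq s b j' hj']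
      have : ¬ (a * s + b = i * s + j) := fun h => hai (block_coords s a b i j hb hj h).1
      simp [this]
  refine (List.flatMap_congr inner).trans ?_
  by_cases hai : a = i
  · simp [hai]
  · simp [hai]

-- A in closed form
lemma get_subsquares_eq_blocks (g : List (List Int)) :
    get_subsquares g = (List.range (pvSqrt ((g.getD 0 []).length))).flatMap (fun i =>
      (List.range (pvSqrt ((g.getD 0 []).length))).map (fun j =>
        pvBlock g (pvSqrt ((g.getD 0 []).length)) i j)) := by
  unfold get_subsquares
  apply List.flatMap_congr
  intro i _
  apply List.map_congr_left
  intro j _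
  rw [get_subsquare_eq]
  rfl

-- B in closed form
lemma get_subsquares_alt_eq_buckets (g : List (List Int)) :
    get_subsquares_alt g = (List.range (pvSqrt ((g.getD 0 []).length) * pvSqrt ((g.getD 0 []).length))).map
      (fun k => pvBucket g (pvSqrt ((g.getD 0 []).length)) k) := by
  unfold get_subsquares_alt
  generalize pvSqrt ((g.getD 0 []).length) = s
  have hflat : (List.range (s * s)).foldl (fun result r =>
        (List.range (s * s)).foldl (fun result c =>
          result.modify (r / s * s + c / s) (· ++ [(g.getD r []).getD c 0])) result)
        ((List.range (s * s)).map (fun _ => ([] : List Int)))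
      = ((List.range (s * s)).flatMap (fun r => (List.range (s * s)).map (fun c => (r, c)))).foldl
          (fun res p => res.modify (p.1 / s * s + p.2 / s) (· ++ [pvCell g p.1 p.2]))
          ((List.range (s * s)).map (fun _ => ([] : List Int))) := by
    rw [List.foldl_flatMap]
    simp only [List.foldl_map]
    rfl
  have hbound : ∀ p ∈ (List.range (s * s)).flatMap (fun r => (List.range (s * s)).map (fun c => (r, c))),
      (fun p : Nat × Nat => p.1 / s * s + p.2 / s) p
        < ((List.range (s * s)).map (fun _ => ([] : List Int))).length := by
    intro p hp
    simp only [List.mem_flatMap, List.mem_map, List.mem_range] at hp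
    obtain ⟨r, hr, c, hc, rfl⟩ := hp
    simpa using bucket_index_lt s r c hr hc
  refine hflat.trans ((foldl_modify_append (fun p : Nat × Nat => p.1 / s * s + p.2 / s)
    (fun p => pvCell g p.1 p.2) _ _ hbound).trans ?_)
  rw [mapIdx_map_range_const]
  apply List.map_congr_left
  intro k _
  unfold pvBucket
  rw [List.filterMap_flatMap]
  simp only [List.filterMap_map, Function.comp_def]
  simp

-- ===== VERDICT (by name: the statement is the Claim_ definition above) =====
theorem get_subsquares_spec : Claim_equal_get_subsquares := by
  intro g _ _
  unfold Spec_get_subsquares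
  rw [get_subsquares_eq_blocks, get_subsquares_alt_eq_buckets]
  generalize pvSqrt ((g.getD 0 []).length) = s
  rw [range_mul_flatMap s s, List.map_flatMap]
  simp only [List.map_map, Function.comp_def]
  apply List.flatMap_congr
  intro i hi
  simp only [List.mem_range] at hi
  apply List.map_congr_left
  intro j hj
  simp only [List.mem_range] at hj
  exact (bucket_eq_block g s i j hi hj).symm
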